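-- pv_equiv track=rewrite | github.com/ZippeyKeys12/pymatching | pymatching/fuzzymatch.py | _compress_match
-- ===== SOURCE A (Python) =====
-- from typing import List, Tuple
--
-- def _capture(s: str, l: List[int]) -> str:
--     return s[l[0]:l[-1] + 1]
--
-- def _compress_match(text: str, match: List[int]) -> Tuple[List[str], str, int]:
--     parts: List[str] = []
--
--     # Finds consecutive matches
--     res: List[int] = []
--     last = match[0]
--     for m in match:
--         if m - last > 1:
--             parts.append(_capture(text, res))
--             res = []
--         res.append(m)
--         last = m
--     parts.append(_capture(text, res))
--
--     return (parts, text[match[0]: match[-1] + 1], match[0])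
-- ===== SOURCE B (Python) =====
-- def _compress_match(text, match):
--     n = len(match)
--     # Stage 1: boundary positions where a new run starts, plus the two ends.
--     cuts = [0] + [k for k in range(1, n) if match[k] - match[k - 1] > 1] + [n]
--     # Stage 2: one slice per pair of consecutive boundaries.
--     parts = [text[match[a]:match[b - 1] + 1] for a, b in zip(cuts, cuts[1:])]
--     return parts, text[match[0]:match[-1] + 1], match[0]
-- ===== Notes on version B (the rewrite author's own statement) =====
-- stated objective: alternative
-- what changed: Replaces A's single streaming fold (which accumulates each run's members in a list `res` and slices via a `_capture` helper when a gap appears) by two staged passes over the data: pass 1 computes the list of run-boundary positions `cuts` (indices where match[k]-match[k-1] > 1, plus 0 and n), pass 2 slices text between each pair of consecutive boundaries; no run accumulator or per-element streaming state exists.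
import Mathlib
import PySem

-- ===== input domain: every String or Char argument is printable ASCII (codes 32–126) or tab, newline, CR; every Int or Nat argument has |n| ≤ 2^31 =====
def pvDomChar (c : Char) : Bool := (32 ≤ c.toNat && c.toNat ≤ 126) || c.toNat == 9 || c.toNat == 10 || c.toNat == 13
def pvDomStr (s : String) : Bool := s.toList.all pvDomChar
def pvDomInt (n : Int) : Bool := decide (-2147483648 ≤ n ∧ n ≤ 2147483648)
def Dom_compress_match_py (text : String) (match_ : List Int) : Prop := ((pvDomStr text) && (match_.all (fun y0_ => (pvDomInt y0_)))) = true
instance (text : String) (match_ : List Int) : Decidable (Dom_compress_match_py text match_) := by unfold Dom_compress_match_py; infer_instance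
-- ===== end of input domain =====

-- B replaces A's streaming fold (which accumulates each run's members in `res`) by two
-- staged passes: first compute the list of run-boundary positions, then slice between them.

-- ===== PORT A =====
-- _capture: s[l[0]:l[-1]+1]; on empty l Python raises IndexError — A only calls it on
-- nonempty l (and the whole function is guarded by Pre_), so the "" branch is unreachable.
def capture_py (s : String) (l : List Int) : String :=
  match PySem.List.pyGet? l 0, PySem.List.pyGet? l (-1) with
  | some a, some b => PySem.Str.slice s (some a) (some (b + 1))
  | _, _ => ""

def compress_match_py (text : String) (match_ : List Int) : List String × String × Int :=
  match match_ with
  | [] => ([], "", 0)   -- Python raises IndexError at `last = match[0]`; excluded by Pre_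
  | m0 :: _ =>
    let st := match_.foldl
      (fun (st : List String × List Int × Int) m =>
        if 1 < m - st.2.2 then (st.1 ++ [capture_py text st.2.1], [m], m)
        else (st.1, st.2.1 ++ [m], m))
      ([], [], m0)
    (st.1 ++ [capture_py text st.2.1],
     PySem.Str.slice text (some ((PySem.List.pyGet? match_ 0).getD 0))
                         (some ((PySem.List.pyGet? match_ (-1)).getD 0 + 1)),
     (PySem.List.pyGet? match_ 0).getD 0)

-- ===== PORT B =====
-- cuts = [0] + [k for k in range(1, n) if match[k] - match[k-1] > 1] + [n]
-- (k is a nonnegative loop index: ported as Nat; match[k] for 0 ≤ k < n is List.getD k 0)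
-- parts = [text[match[a]:match[b-1]+1] for a, b in zip(cuts, cuts[1:])]
def compress_match_py_alt (text : String) (match_ : List Int) : List String × String × Int :=
  match match_ with
  | [] => ([], "", 0)   -- Python raises IndexError at `match[a]` in the comprehension; excluded by Pre_
  | _ :: _ =>
    let n := match_.length
    let cuts : List Nat :=
      0 :: ((List.range' 1 (n - 1)).filter
              (fun k => decide (1 < match_.getD k 0 - match_.getD (k - 1) 0)) ++ [n])
    let parts := (cuts.zip cuts.tail).map
      (fun ab => PySem.Str.slice text (some (match_.getD ab.1 0))
                                      (some (match_.getD (ab.2 - 1) 0 + 1)))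
    (parts,
     PySem.Str.slice text (some ((PySem.List.pyGet? match_ 0).getD 0))
                         (some ((PySem.List.pyGet? match_ (-1)).getD 0 + 1)),
     (PySem.List.pyGet? match_ 0).getD 0)

-- ===== PRECONDITION & SPEC =====
-- A raises IndexError (match[0]) exactly on the empty list; nothing else is excluded.
def Pre_compress_match_py (text : String) (match_ : List Int) : Prop := match_ ≠ []
instance (text : String) (match_ : List Int) : Decidable (Pre_compress_match_py text match_) := by unfold Pre_compress_match_py; infer_instance
def pvWitness_compress_match_py : String × List Int := ("abcdef", [1, 2, 5])

def Spec_compress_match_py (text : String) (match_ : List Int) (out : List String × String × Int) : Prop := out = compress_match_py_alt text match_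
instance (text : String) (match_ : List Int) (out : List String × String × Int) : Decidable (Spec_compress_match_py text match_ out) := by unfold Spec_compress_match_py; infer_instance

-- ===== CLAIM (what is proved, stated in full; the proofs are below) =====
def Claim_equal_compress_match_py : Prop := ∀ (text : String) (match_ : List Int), Dom_compress_match_py text match_ → Pre_compress_match_py text match_ → Spec_compress_match_py text match_ (compress_match_py text match_)

-- ===== LEMMAS AND PROOFS =====

-- proof-side characterization of the run decomposition: one slice per run, tracking the
-- run-start value `start` and the previous value `last`
def pr (text : String) (start last : Int) : List Int → List String
  | [] => [PySem.Str.slice text (some start) (some (last + 1))]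
  | m :: tl =>
    if 1 < m - last then
      PySem.Str.slice text (some start) (some (last + 1)) :: pr text m m tl
    else pr text start m tl

theorem cons_getElem_length (r0 : Int) (rest : List Int) :
    (r0 :: rest)[rest.length]'(by simp) = rest.getLastD r0 := by
  induction rest generalizing r0 with
  | nil => rfl
  | cons b bs ih => rw [List.getLastD_cons]; simpa using ih b

theorem capture_py_eq (s : String) (r0 : Int) (rest : List Int) :
    capture_py s (r0 :: rest) =
      PySem.Str.slice s (some r0) (some (rest.getLastD r0 + 1)) := by
  simp [capture_py, PySem.List.pyGet?, PySem.List.pyIdx?, cons_getElem_length]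

theorem foldA_eq (text : String) (l : List Int) :
    ∀ (parts : List String) (r0 : Int) (rest : List Int),
    (fun (s : List String × List Int × Int) => s.1 ++ [capture_py text s.2.1])
      (l.foldl
        (fun (st : List String × List Int × Int) m =>
          if 1 < m - st.2.2 then (st.1 ++ [capture_py text st.2.1], [m], m)
          else (st.1, st.2.1 ++ [m], m))
        (parts, r0 :: rest, rest.getLastD r0))
      = parts ++ pr text r0 (rest.getLastD r0) l := by
  induction l with
  | nil =>
    intro parts r0 rest
    simp [pr, capture_py_eq]
  | cons m tl ih =>
    intro parts r0 rest
    simp only [List.foldl_cons, pr]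
    split_ifs with h
    · have := ih (parts ++ [capture_py text (r0 :: rest)]) m []
      simp only [List.getLastD_nil] at this
      rw [this, capture_py_eq, List.append_assoc]
      simp
    · have := ih parts r0 (rest ++ [m])
      simp only [List.getLastD_concat] at this
      exact this

-- proof-side reading of B's zip-comprehension: consume the cut list left to right
def goParts (text : String) (xs : List Int) (a : Nat) : List Nat → List String
  | [] => []
  | c :: cs =>
    PySem.Str.slice text (some (xs.getD a 0)) (some (xs.getD (c - 1) 0 + 1))
      :: goParts text xs c cs

theorem zip_map_eq_go (text : String) (xs : List Int) :
    ∀ (cs : List Nat) (a : Nat),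
    (((a :: cs).zip cs).map
      (fun ab => PySem.Str.slice text (some (xs.getD ab.1 0))
                                      (some (xs.getD (ab.2 - 1) 0 + 1))))
      = goParts text xs a cs := by
  intro cs
  induction cs with
  | nil => intro a; rfl
  | cons c cs ih =>
    intro a
    rw [show ((a :: c :: cs).zip (c :: cs)) = (a, c) :: ((c :: cs).zip cs) from rfl,
      List.map_cons, ih c]
    rfl

theorem pr_eq_go (text : String) (xs : List Int) (n : Nat) (hn : n = xs.length) :
    ∀ (k j a : Nat), n - j ≤ k → 1 ≤ j → j ≤ n →
    pr text (xs.getD a 0) (xs.getD (j - 1) 0) (xs.drop j)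
      = goParts text xs a
          ((List.range' j (n - j)).filter
            (fun k => decide (1 < xs.getD k 0 - xs.getD (k - 1) 0)) ++ [n]) := by
  intro k
  induction k using Nat.strong_induction_on with
  | _ k ih =>
    intro j a hkj hj1 hjn
    rcases Nat.lt_or_ge j n with hlt | hge
    · have hjx : j < xs.length := by omega
      have hdrop : xs.drop j = xs[j] :: xs.drop (j + 1) := List.drop_eq_getElem_cons hjx
      have hgd : xs.getD j 0 = xs[j] := List.getD_eq_getElem xs 0 hjx
      have hr : List.range' j (n - j) = j :: List.range' (j + 1) (n - (j + 1)) := by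
        rw [show n - j = (n - (j + 1)) + 1 by omega, List.range'_succ]
      rw [hdrop, hr]
      by_cases hc : 1 < xs.getD j 0 - xs.getD (j - 1) 0
      · -- gap at j: j is a cut; run ends
        have hyes : 1 < xs[j] - xs.getD (j - 1) 0 := by rw [← hgd]; exact hc
        rw [pr, if_pos hyes]
        rw [List.filter_cons_of_pos (by simpa using hc)]
        rw [List.cons_append, goParts]
        have := ih (n - (j + 1)) (by omega) (j + 1) j (le_refl _) (by omega) (by omega)
        simp only [Nat.add_sub_cancel, hgd] at this
        rw [this]
      · -- no gap: j is not a cut; run continues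
        have hnot : ¬ 1 < xs[j] - xs.getD (j - 1) 0 := by rw [← hgd]; exact hc
        rw [pr, if_neg hnot]
        rw [List.filter_cons_of_neg (by simpa using hc)]
        have := ih (n - (j + 1)) (by omega) (j + 1) a (le_refl _) (by omega) (by omega)
        simp only [Nat.add_sub_cancel, hgd] at this
        exact this
    · -- j = n : suffix empty, only the final cut n remains
      have hje : j = n := by omega
      rw [show xs.drop j = [] from by rw [List.drop_eq_nil_iff]; omega]
      rw [show n - j = 0 by omega]
      simp only [List.range'_zero, List.filter_nil, List.nil_append]
      rw [pr, goParts, goParts, hje]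

-- ===== VERDICT (by name: the statement is the Claim_ definition above) =====
theorem compress_match_py_spec : Claim_equal_compress_match_py := by
  intro text match_ _hdom hpre
  unfold Spec_compress_match_py
  match match_, hpre with
  | m0 :: tl, _ =>
    unfold compress_match_py compress_match_py_alt
    simp only []
    refine Prod.ext ?_ rfl
    -- parts of A
    have hA : (fun (s : List String × List Int × Int) => s.1 ++ [capture_py text s.2.1])
        ((m0 :: tl).foldl
          (fun (st : List String × List Int × Int) m =>
            if 1 < m - st.2.2 then (st.1 ++ [capture_py text st.2.1], [m], m)
            else (st.1, st.2.1 ++ [m], m))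
          ([], [], m0)) = pr text m0 m0 tl := by
      rw [List.foldl_cons]
      rw [show (if 1 < m0 - (([], [], m0) : List String × List Int × Int).2.2
            then ((([], [], m0) : List String × List Int × Int).1 ++ [capture_py text ([], [], m0).2.1], [m0], m0)
            else (([] : List String), ([] : List Int) ++ [m0], m0))
          = (([] : List String), [m0], m0) from by norm_num]
      have := foldA_eq text tl [] m0 []
      simpa using this
    -- parts of B
    have hB : (((0 : Nat) ::
          ((List.range' 1 ((m0 :: tl).length - 1)).filter
              (fun k => decide (1 < (m0 :: tl).getD k 0 - (m0 :: tl).getD (k - 1) 0))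
            ++ [(m0 :: tl).length])).zip
          (((List.range' 1 ((m0 :: tl).length - 1)).filter
              (fun k => decide (1 < (m0 :: tl).getD k 0 - (m0 :: tl).getD (k - 1) 0))
            ++ [(m0 :: tl).length]))).map
          (fun ab => PySem.Str.slice text (some ((m0 :: tl).getD ab.1 0))
                                          (some ((m0 :: tl).getD (ab.2 - 1) 0 + 1)))
        = pr text m0 m0 tl := by
      rw [zip_map_eq_go]
      have := pr_eq_go text (m0 :: tl) (m0 :: tl).length rfl
        ((m0 :: tl).length - 1) 1 0 (by omega) (le_refl _) (by simp)
      simp only [Nat.sub_self, List.getD_cons_zero, List.drop_one, List.tail_cons,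
        List.length_cons, Nat.add_sub_cancel] at this ⊢
      exact this.symm
    exact hA.trans hB.symm
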